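-- pv_equiv track=rewrite | github.com/GA-jahida/advent-of-code | 2023/day25.py | parse
-- ===== SOURCE A (Python) =====
-- def parse(lines):
--     wire_dict = {}
--     components = set()
--     for line in lines:
--         line = line.replace('\n','')
--         component = line.split(':')[0]
--         connections = set(line.split(':')[1][1:].split(' '))
--
--         components.add(component)
--
--         if component in wire_dict:
--             for connection in connections:
--                 wire_dict[component].add(connection)
--         else:
--             wire_dict[component] = connections
--
--         for connection in connections:
--             components.add(connection)
--             if connection in wire_dict:
--                 wire_dict[connection].add(component)
--             else:
--                 wire_dict[connection] = set([component])
--     return wire_dict, components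
-- ===== SOURCE B (Python) =====
-- def parse(lines):
--     # B: instead of A's incremental, branch-per-membership dict construction, compute the
--     # result closed-form: parse the lines once, derive the node order, then build each
--     # node's neighborhood by scanning the parsed lines for that node.
--     parsed = []
--     for line in lines:
--         line = line.replace('\n', '')
--         parts = line.split(':')
--         parsed.append((parts[0], list(dict.fromkeys(parts[1][1:].split(' ')))))
--
--     # all nodes in order of first appearance (source before its connections, line by line)
--     order = list(dict.fromkeys(n for src, conns in parsed for n in [src] + conns))
--
--     def neighbors(u):
--         out = []
--         for src, conns in parsed:
--             if src == u:
--                 out.extend(conns)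
--             if u in conns:
--                 out.append(src)
--         return set(out)
--
--     graph = {u: neighbors(u) for u in order}
--     return graph, set(order)
-- ===== Notes on version B (the rewrite author's own statement) =====
-- stated objective: alternative
-- what changed: A builds the adjacency dict and component set incrementally per line with if/else membership branches; B parses all lines once, derives the node list in first-appearance order, and then computes each node's neighborhood independently by scanning the parsed lines, assembling the dict in one comprehension.
import Mathlib
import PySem

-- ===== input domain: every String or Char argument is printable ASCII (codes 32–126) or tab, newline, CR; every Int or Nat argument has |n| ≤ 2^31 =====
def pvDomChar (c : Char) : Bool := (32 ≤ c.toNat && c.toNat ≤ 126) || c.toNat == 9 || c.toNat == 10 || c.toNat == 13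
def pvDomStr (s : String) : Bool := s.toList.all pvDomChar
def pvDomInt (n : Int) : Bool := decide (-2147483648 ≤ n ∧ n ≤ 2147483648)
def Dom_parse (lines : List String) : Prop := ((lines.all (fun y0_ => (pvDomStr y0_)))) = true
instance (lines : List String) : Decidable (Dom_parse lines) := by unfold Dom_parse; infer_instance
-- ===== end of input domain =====

-- B replaces A's incremental membership-branching dict construction by a closed-form build:
-- parse once, compute the node order, then compute each node's neighborhood by scanning the
-- parsed lines (alternative decomposition; return values are proved equal).

-- shared line parsing (both Pythons split each line identically):
-- line.replace('\n',''); line.split(':')[0]; dedup of line.split(':')[1][1:].split(' ')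
def pvParseLine (line : String) : String × List String :=
  let l := PySem.Str.replace line "\n" ""
  let parts := (PySem.Str.split? l ":").getD []
  (PySem.List.pyGetD parts 0 "",
   PySem.Set.ofList
     ((PySem.Str.split? (PySem.Str.slice (PySem.List.pyGetD parts 1 "") (some 1) none) " ").getD []))

-- ===== PORT A =====
-- one iteration of A's 'for line in lines' loop (literal: membership branches kept)
def pvStepA (st : PySem.Dict String (PySem.Set String) × PySem.Set String) (line : String) :
    PySem.Dict String (PySem.Set String) × PySem.Set String :=
  let pc := pvParseLine line
  let component := pc.1
  let connections := pc.2
  let comps := PySem.Set.add st.2 component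
  let wd :=
    if st.1.contains component = true then
      connections.foldl (fun d c => d.modify component [] (fun s => PySem.Set.add s c)) st.1
    else
      st.1.insert component connections
  connections.foldl
    (fun (p : PySem.Dict String (PySem.Set String) × PySem.Set String) c =>
      (if p.1.contains c = true then p.1.modify c [] (fun s => PySem.Set.add s component)
       else p.1.insert c (PySem.Set.ofList [component]),
       PySem.Set.add p.2 c))
    (wd, comps)

def parse (lines : List String) : (List (String × List String)) × List String :=
  let st := lines.foldl pvStepA (PySem.Dict.empty, PySem.Set.empty)
  (st.1.items, st.2)

-- ===== PORT B =====
-- neighbors(u): scan the parsed lines; out.extend(conns) when src == u, out.append(src)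
-- when u in conns; return set(out)
def pvNeighbors (parsed : List (String × List String)) (u : String) : PySem.Set String :=
  PySem.Set.ofList
    (parsed.foldl
      (fun out p =>
        let out := if p.1 == u then out ++ p.2 else out
        if u ∈ p.2 then out ++ [p.1] else out)
      [])

def parse_alt (lines : List String) : (List (String × List String)) × List String :=
  let parsed := lines.foldl (fun acc line => acc ++ [pvParseLine line]) []
  let order := PySem.Set.ofList (parsed.flatMap (fun p => p.1 :: p.2))
  let graph := order.foldl (fun d u => d.insert u (pvNeighbors parsed u)) PySem.Dict.empty
  (graph.items, PySem.Set.ofList order)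

-- ===== PRECONDITION & SPEC =====
-- Pre_ excludes exactly the inputs on which the Python A raises IndexError:
-- a line with no ':' makes line.split(':')[1] fail (B's identical split fails there too).
def Pre_parse (lines : List String) : Prop :=
  ∀ line ∈ lines, PySem.Str.isIn ":" line = true
instance (lines : List String) : Decidable (Pre_parse lines) := by unfold Pre_parse; infer_instance

def pvWitness_parse : List String := ["jqt: rhn xhk nvd", "rhn: xhk"]

def Spec_parse (lines : List String) (out : (List (String × List String)) × List String) : Prop := out = parse_alt lines
instance (lines : List String) (out : (List (String × List String)) × List String) : Decidable (Spec_parse lines out) := by unfold Spec_parse; infer_instance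

-- ===== CLAIM (what is proved, stated in full; the proofs are below) =====
def Claim_equal_parse : Prop := ∀ (lines : List String), Dom_parse lines → Pre_parse lines → Spec_parse lines (parse lines)

-- ===== LEMMAS AND PROOFS =====

-- the edges contributed by one line, and the edge-level step (used only by the proof)
def pvEdges (line : String) : List (String × String) :=
  let pc := pvParseLine line
  pc.2.map (fun dst => (pc.1, dst))

def pvAdd (d : PySem.Dict String (PySem.Set String)) (k x : String) :
    PySem.Dict String (PySem.Set String) :=
  d.modify k [] (fun s => PySem.Set.add s x)

def pvStepE (st : PySem.Dict String (PySem.Set String) × PySem.Set String) (e : String × String) :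
    PySem.Dict String (PySem.Set String) × PySem.Set String :=
  (pvAdd (pvAdd st.1 e.1 e.2) e.2 e.1,
   PySem.Set.add (PySem.Set.add st.2 e.1) e.2)

-- closed forms (used only by the proof)
def pvOrderE (es : List (String × String)) : PySem.Set String :=
  PySem.Set.ofList (es.flatMap (fun e => [e.1, e.2]))

def pvAdjE (es : List (String × String)) (u : String) : PySem.Set String :=
  PySem.Set.ofList
    (es.flatMap (fun e => (if e.1 == u then [e.2] else []) ++ (if e.2 == u then [e.1] else [])))

-- the split of a line never yields an empty list of pieces
theorem pv_go_ne_nil (sep : List Char) :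
    ∀ (fuel : Nat) (l cur : List Char) (accs : List (List Char)),
      PySem.Chars.splitOn.go sep fuel l cur accs ≠ [] := by
  intro fuel
  induction fuel with
  | zero => intro l cur accs; simp [PySem.Chars.splitOn.go]
  | succ n ih =>
      intro l cur accs
      cases l with
      | nil => simp [PySem.Chars.splitOn.go]
      | cons c rest =>
          simp only [PySem.Chars.splitOn.go]
          split
          · exact ih _ _ _
          · exact ih _ _ _

theorem pv_conns_ne_nil (line : String) : (pvParseLine line).2 ≠ [] := by
  have h1 : ∀ (s : String),
      (PySem.Str.split? s " ").getD [] ≠ ([] : List String) := by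
    intro s
    simp only [PySem.Str.split?, PySem.Chars.split?, PySem.Chars.splitOn]
    simp only [List.isEmpty_iff]
    rw [if_neg (by simp)]
    simp only [Option.map_some, Option.getD_some, ne_eq, List.map_eq_nil_iff]
    exact pv_go_ne_nil _ _ _ [] []
  have h2 := h1 (PySem.Str.slice
      (PySem.List.pyGetD ((PySem.Str.split? (PySem.Str.replace line "\n" "") ":").getD []) 1 "")
      (some 1) none)
  simp only [pvParseLine, ne_eq]
  intro hc
  rcases List.exists_mem_of_ne_nil _ h2 with ⟨x, hx⟩
  have : x ∈ (PySem.Set.ofList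
      ((PySem.Str.split? (PySem.Str.slice
        (PySem.List.pyGetD ((PySem.Str.split? (PySem.Str.replace line "\n" "") ":").getD []) 1 "")
        (some 1) none) " ").getD [])) := (PySem.Set.mem_ofList _ _).mpr hx
  rw [hc] at this
  exact (List.not_mem_nil) this

-- ==== A reduces to a fold over the edge stream (as in the per-edge decomposition) ====

theorem pvAdd_contains (d : PySem.Dict String (PySem.Set String)) (k x j : String) :
    (pvAdd d k x).contains j = (j == k || d.contains j) := by
  simp [pvAdd, PySem.Dict.contains_modify]

theorem pvAdd_nodup {d : PySem.Dict String (PySem.Set String)} (k x : String)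
    (h : d.keys.Nodup) : (pvAdd d k x).keys.Nodup :=
  PySem.Dict.nodup_keys_insert _ _ _ h

theorem pvAdd_getD_self (d : PySem.Dict String (PySem.Set String)) (k x : String) :
    (pvAdd d k x).getD k [] = (d.getD k []).add x :=
  PySem.Dict.getD_modify_self d k [] _

theorem pvAdd_getD_of_ne (d : PySem.Dict String (PySem.Set String)) {k j : String} (x : String)
    (h : j ≠ k) : (pvAdd d k x).getD j [] = d.getD j [] :=
  PySem.Dict.getD_modify_of_ne d [] _ h

theorem pv_insert_getD_self {d : PySem.Dict String (PySem.Set String)} {k : String}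
    (hc : d.contains k = true) (hn : d.keys.Nodup) :
    d.insert k (d.getD k []) = d := by
  apply PySem.Dict.ext
  rw [PySem.Dict.items_insert_of_contains d _ hc]
  have hmap : ∀ p ∈ d.items,
      (if (p.1 == k) = true then (k, d.getD k []) else p) = p := by
    intro p hp
    by_cases hpk : p.1 = k
    · have hmem : (k, p.2) ∈ d.items := by cases p; simp_all
      have hg : d.get? k = some p.2 := PySem.Dict.get?_of_mem_items d hmem hn
      have hgd : d.getD k [] = p.2 := by simp [PySem.Dict.getD, hg]
      cases p; simp_all
    · simp [hpk]
  calc List.map (fun p => if (p.1 == k) = true then (k, d.getD k []) else p) d.items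
      = List.map id d.items := List.map_congr_left hmap
    _ = d.items := List.map_id _

theorem pvAdd_noop {d : PySem.Dict String (PySem.Set String)} {k x : String}
    (hc : d.contains k = true) (hn : d.keys.Nodup) (hx : x ∈ d.getD k []) :
    pvAdd d k x = d := by
  have : (d.getD k []).add x = d.getD k [] := PySem.Set.add_of_mem hx
  show d.insert k ((d.getD k []).add x) = d
  rw [this]
  exact pv_insert_getD_self hc hn

theorem pv_insert_comm {d : PySem.Dict String (PySem.Set String)} {j k : String}
    (vj vk : PySem.Set String) (hjk : j ≠ k) (hk : d.contains k = true) :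
    (d.insert j vj).insert k vk = (d.insert k vk).insert j vj := by
  have hbjk : (j == k) = false := by simp [hjk]
  apply PySem.Dict.ext
  by_cases hj : d.contains j = true
  · rw [PySem.Dict.items_insert_of_contains _ vk
        (by rw [PySem.Dict.contains_insert]; simp [hk]),
      PySem.Dict.items_insert_of_contains _ vj hj,
      PySem.Dict.items_insert_of_contains _ vj
        (by rw [PySem.Dict.contains_insert]; simp [hj]),
      PySem.Dict.items_insert_of_contains _ vk hk]
    rw [List.map_map, List.map_map]
    apply List.map_congr_left
    intro p _
    by_cases h1 : p.1 = j
    · simp [h1, hjk]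
    · by_cases h2 : p.1 = k
      · simp [h2, Ne.symm hjk]
      · simp [h1, h2]
  · have hj' : d.contains j = false := by simpa using hj
    rw [PySem.Dict.items_insert_of_contains _ vk
        (by rw [PySem.Dict.contains_insert]; simp [hk]),
      PySem.Dict.items_insert_of_not_contains _ vj hj',
      PySem.Dict.items_insert_of_not_contains _ vj
        (by rw [PySem.Dict.contains_insert]; simp [hbjk, hj']),
      PySem.Dict.items_insert_of_contains _ vk hk]
    rw [List.map_append]
    simp [hjk]

theorem pv_swap {d : PySem.Dict String (PySem.Set String)} {c src : String} (x y : String)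
    (hcs : c ≠ src) (hs : d.contains src = true) :
    pvAdd (pvAdd d c x) src y = pvAdd (pvAdd d src y) c x := by
  have h1 : (pvAdd d c x).getD src [] = d.getD src [] := pvAdd_getD_of_ne d x (Ne.symm hcs)
  have h2 : (pvAdd d src y).getD c [] = d.getD c [] := pvAdd_getD_of_ne d y hcs
  show (pvAdd d c x).insert src (((pvAdd d c x).getD src []).add y)
      = (pvAdd d src y).insert c (((pvAdd d src y).getD c []).add x)
  rw [h1, h2]
  show ((d.insert c ((d.getD c []).add x)).insert src ((d.getD src []).add y))
      = ((d.insert src ((d.getD src []).add y)).insert c ((d.getD c []).add x))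
  exact pv_insert_comm _ _ hcs hs

theorem pv_comm {c src : String} (hcs : c ≠ src) :
    ∀ (rest : List String) (d : PySem.Dict String (PySem.Set String)),
      d.contains src = true →
      rest.foldl (fun g c' => pvAdd g src c') (pvAdd d c src)
        = pvAdd (rest.foldl (fun g c' => pvAdd g src c') d) c src := by
  intro rest
  induction rest with
  | nil => intro d _; rfl
  | cons r rest ih =>
      intro d hs
      simp only [List.foldl_cons]
      rw [pv_swap src r hcs hs]
      exact ih _ (by rw [pvAdd_contains]; simp)

theorem pv_mem_fwd {src x : String} :
    ∀ (rest : List String) (d : PySem.Dict String (PySem.Set String)),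
      x ∈ d.getD src [] →
      x ∈ (rest.foldl (fun g c' => pvAdd g src c') d).getD src [] := by
  intro rest
  induction rest with
  | nil => intro d h; exact h
  | cons r rest ih =>
      intro d h
      apply ih
      rw [pvAdd_getD_self]
      exact (PySem.Set.mem_add _ _ _).mpr (Or.inl h)

theorem pv_nodup_fwd {src : String} :
    ∀ (rest : List String) (d : PySem.Dict String (PySem.Set String)),
      d.keys.Nodup → (rest.foldl (fun g c' => pvAdd g src c') d).keys.Nodup := by
  intro rest
  induction rest with
  | nil => intro d h; exact h
  | cons r rest ih => intro d h; exact ih _ (pvAdd_nodup _ _ h)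

theorem pv_contains_fwd {src j : String} :
    ∀ (rest : List String) (d : PySem.Dict String (PySem.Set String)),
      d.contains j = true → (rest.foldl (fun g c' => pvAdd g src c') d).contains j = true := by
  intro rest
  induction rest with
  | nil => intro d h; exact h
  | cons r rest ih => intro d h; exact ih _ (by rw [pvAdd_contains]; simp [h])

theorem pv_core :
    ∀ (conns : List String) (src : String) (d : PySem.Dict String (PySem.Set String))
      (cs : PySem.Set String), conns ≠ [] → d.keys.Nodup →
      (conns.map (fun c => (src, c))).foldl pvStepE (d, cs)
        = conns.foldl (fun p c => (pvAdd p.1 c src, PySem.Set.add p.2 c))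
            (conns.foldl (fun g c => pvAdd g src c) d, PySem.Set.add cs src) := by
  intro conns
  induction conns with
  | nil => intro src d cs h _; exact absurd rfl h
  | cons c rest ih =>
      intro src d cs _ hn
      simp only [List.map_cons, List.foldl_cons]
      rcases List.eq_nil_or_concat' rest with hrest | _
      · subst hrest; simp [pvStepE]
      · have hrne : rest ≠ [] := by rename_i h; rcases h with ⟨l, a, rfl⟩; simp
        have hn' : (pvAdd (pvAdd d src c) c src).keys.Nodup :=
          pvAdd_nodup _ _ (pvAdd_nodup _ _ hn)
        rw [show pvStepE (d, cs) (src, c)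
              = (pvAdd (pvAdd d src c) c src, (cs.add src).add c) from rfl]
        rw [ih src _ _ hrne hn']
        have hset : ((cs.add src).add c).add src = (cs.add src).add c :=
          PySem.Set.add_of_mem ((PySem.Set.mem_add _ _ _).mpr
            (Or.inl ((PySem.Set.mem_add _ _ _).mpr (Or.inr rfl))))
        rw [hset]
        congr 2
        by_cases hcs : c = src
        · subst hcs
          have hX : pvAdd (pvAdd d c c) c c = pvAdd d c c := by
            apply pvAdd_noop (by rw [pvAdd_contains]; simp) (pvAdd_nodup _ _ hn)
            rw [pvAdd_getD_self]
            exact (PySem.Set.mem_add _ _ _).mpr (Or.inr rfl)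
          rw [hX]
          have hmem : c ∈ (rest.foldl (fun g c' => pvAdd g c c') (pvAdd d c c)).getD c [] := by
            apply pv_mem_fwd
            rw [pvAdd_getD_self]
            exact (PySem.Set.mem_add _ _ _).mpr (Or.inr rfl)
          rw [pvAdd_noop (pv_contains_fwd rest _ (by rw [pvAdd_contains]; simp))
            (pv_nodup_fwd rest _ (pvAdd_nodup _ _ hn)) hmem]
        · exact pv_comm hcs rest (pvAdd d src c) (by rw [pvAdd_contains]; simp)

theorem pv_fwd_char {src : String} :
    ∀ (conns : List String) (d : PySem.Dict String (PySem.Set String)),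
      d.contains src = true → d.keys.Nodup →
      conns.foldl (fun g c => pvAdd g src c) d
        = d.insert src (conns.foldl PySem.Set.add (d.getD src [])) := by
  intro conns
  induction conns with
  | nil => intro d hc hn; exact (pv_insert_getD_self hc hn).symm
  | cons c rest ih =>
      intro d hc hn
      simp only [List.foldl_cons]
      rw [ih _ (by rw [pvAdd_contains]; simp) (pvAdd_nodup _ _ hn)]
      rw [pvAdd_getD_self]
      show (d.insert src ((d.getD src []).add c)).insert src _ = _
      rw [PySem.Dict.insert_insert_self]

theorem pv_fwd_new {src : String} {conns : List String}
    (hnd : conns.Nodup) (hne : conns ≠ [])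
    (d : PySem.Dict String (PySem.Set String)) (hc : d.contains src = false)
    (hn : d.keys.Nodup) :
    conns.foldl (fun g c => pvAdd g src c) d = d.insert src conns := by
  cases conns with
  | nil => exact absurd rfl hne
  | cons c rest =>
      simp only [List.foldl_cons]
      have h1 : pvAdd d src c = d.insert src (PySem.Set.add [] c) := by
        show d.insert src ((d.getD src []).add c) = _
        rw [PySem.Dict.getD_of_not_contains d [] hc]
      rw [h1, pv_fwd_char rest _ (PySem.Dict.contains_insert_self _ _ _)
        (PySem.Dict.nodup_keys_insert _ _ _ hn)]
      rw [PySem.Dict.insert_insert_self, PySem.Dict.getD_insert_self]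
      congr 1
      have h2 : List.foldl PySem.Set.add ([] : PySem.Set String) (c :: rest) = c :: rest := by
        rw [← PySem.Set.ofList_eq_foldl, PySem.Set.ofList_eq_self_of_nodup _ hnd]
      simpa using h2

theorem pv_conns_nodup (line : String) : (pvParseLine line).2.Nodup := by
  simp only [pvParseLine]
  exact PySem.Set.nodup_ofList _

theorem pv_line (st : PySem.Dict String (PySem.Set String) × PySem.Set String) (line : String)
    (hn : st.1.keys.Nodup) :
    pvStepA st line = (pvEdges line).foldl pvStepE st := by
  obtain ⟨d, cs⟩ := st
  have hne := pv_conns_ne_nil line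
  have hnd := pv_conns_nodup line
  set src := (pvParseLine line).1 with hsrc
  set conns := (pvParseLine line).2 with hconns
  have hback :
      (fun (p : PySem.Dict String (PySem.Set String) × PySem.Set String) c =>
        (if p.1.contains c = true then p.1.modify c [] (fun s => PySem.Set.add s src)
         else p.1.insert c (PySem.Set.ofList [src]),
         PySem.Set.add p.2 c))
      = fun p c => (pvAdd p.1 c src, PySem.Set.add p.2 c) := by
    funext p c
    by_cases h : p.1.contains c = true
    · rw [if_pos h]; rfl
    · have h' : p.1.contains c = false := by simpa using h
      rw [if_neg h]
      have hins : pvAdd p.1 c src = p.1.insert c (PySem.Set.ofList [src]) := by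
        show p.1.insert c ((p.1.getD c []).add src) = _
        rw [PySem.Dict.getD_of_not_contains p.1 [] h', PySem.Set.ofList_eq_foldl]
        rfl
      rw [hins]
  have hfwd :
      (if d.contains src = true then
        conns.foldl (fun g c => g.modify src [] (fun s => PySem.Set.add s c)) d
      else d.insert src conns)
      = conns.foldl (fun g c => pvAdd g src c) d := by
    by_cases h : d.contains src = true
    · rw [if_pos h]; rfl
    · have h' : d.contains src = false := by simpa using h
      rw [if_neg h]
      exact (pv_fwd_new hnd hne d h' hn).symm
  simp only [pvStepA, pvEdges, ← hsrc, ← hconns]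
  rw [hback, hfwd, pv_core conns src d cs hne hn]

theorem pv_nodup_stepE :
    ∀ (es : List (String × String))
      (st : PySem.Dict String (PySem.Set String) × PySem.Set String),
      st.1.keys.Nodup → ((es.foldl pvStepE st).1).keys.Nodup := by
  intro es
  induction es with
  | nil => intro st h; exact h
  | cons e es ih =>
      intro st h
      exact ih _ (pvAdd_nodup _ _ (pvAdd_nodup _ _ h))

theorem pv_main :
    ∀ (lines : List String) (st : PySem.Dict String (PySem.Set String) × PySem.Set String),
      st.1.keys.Nodup →
      lines.foldl pvStepA st = (lines.flatMap pvEdges).foldl pvStepE st := by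
  intro lines
  induction lines with
  | nil => intro st _; rfl
  | cons l rest ih =>
      intro st hn
      simp only [List.foldl_cons, List.flatMap_cons, List.foldl_append]
      rw [pv_line st l hn, ih _ (pv_nodup_stepE _ _ hn)]

-- ==== closed form of the edge fold ====

-- pvAdd on a dict in map form
theorem pvAdd_items {d : PySem.Dict String (PySem.Set String)} {O : PySem.Set String}
    {adj : String → PySem.Set String} (k x : String)
    (hItems : d.items = O.map (fun u => (u, adj u))) (hNodup : O.Nodup)
    (hNil : ∀ u, u ∉ O → adj u = []) :
    (pvAdd d k x).items
      = (PySem.Set.add O k).map (fun u => (u, if u = k then (adj u).add x else adj u)) := by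
  have hkeys : d.keys = O := by
    show d.items.map (·.1) = O
    have hcomp : ((·.1 : String × PySem.Set String → String) ∘ fun u => (u, adj u)) = id := rfl
    rw [hItems, List.map_map, hcomp, List.map_id]
  by_cases hk : k ∈ O
  · have hc : d.contains k = true := by
      rw [PySem.Dict.contains_iff_mem_keys, hkeys]; exact hk
    have hget : d.getD k [] = adj k := by
      have hmem : (k, adj k) ∈ d.items := by
        rw [hItems]; exact List.mem_map.mpr ⟨k, hk, rfl⟩
      have hnk : d.keys.Nodup := by rw [hkeys]; exact hNodup
      have := PySem.Dict.get?_of_mem_items d hmem hnk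
      simp [PySem.Dict.getD, this]
    show (d.insert k ((d.getD k []).add x)).items = _
    rw [PySem.Dict.items_insert_of_contains _ _ hc, hItems, List.map_map,
      PySem.Set.add_of_mem hk]
    apply List.map_congr_left
    intro u _
    by_cases huk : u = k
    · subst huk; simp [hget]
    · simp [huk]
  · have hc : d.contains k = false := by
      rw [← Bool.not_eq_true, PySem.Dict.contains_iff_mem_keys, hkeys]; exact hk
    have hget : d.getD k [] = [] := PySem.Dict.getD_of_not_contains d [] hc
    show (d.insert k ((d.getD k []).add x)).items = _
    rw [PySem.Dict.items_insert_of_not_contains _ _ hc, hItems,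
      PySem.Set.add_of_not_mem hk, List.map_append]
    congr 1
    · apply List.map_congr_left
      intro u hu
      have : u ≠ k := fun h => hk (h ▸ hu)
      simp [this]
    · simp [hget, hNil k hk, PySem.Set.add]

theorem pvAdjE_nil {es : List (String × String)} {u : String} (h : u ∉ pvOrderE es) :
    pvAdjE es u = [] := by
  have hflat : ∀ e ∈ es, e.1 ≠ u ∧ e.2 ≠ u := by
    intro e he
    constructor <;> intro hx <;> apply h <;>
      exact (PySem.Set.mem_ofList _ _).mpr (List.mem_flatMap.mpr ⟨e, he, by simp [hx]⟩)
  have : es.flatMap (fun e => (if e.1 == u then [e.2] else [])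
      ++ (if e.2 == u then [e.1] else [])) = [] := by
    rw [List.flatMap_eq_nil_iff]
    intro e he
    rcases hflat e he with ⟨h1, h2⟩
    simp [h1, h2]
  show PySem.Set.ofList _ = []
  rw [this]
  rfl

theorem pv_edge_closed (es : List (String × String)) :
    (es.foldl pvStepE (PySem.Dict.empty, PySem.Set.empty)).1.items
        = (pvOrderE es).map (fun u => (u, pvAdjE es u))
      ∧ (es.foldl pvStepE (PySem.Dict.empty, PySem.Set.empty)).2 = pvOrderE es := by
  induction es using List.reverseRecOn with
  | nil => constructor <;> rfl
  | append_singleton es e ih =>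
      obtain ⟨ihD, ihS⟩ := ih
      obtain ⟨a, b⟩ := e
      have hOrd : pvOrderE (es ++ [(a, b)]) = ((pvOrderE es).add a).add b := by
        simp only [pvOrderE, List.flatMap_append, PySem.Set.ofList_append]
        simp [PySem.Set.update_cons, PySem.Set.update_nil]
      have hAdj : ∀ u, pvAdjE (es ++ [(a, b)]) u
          = PySem.Set.update (pvAdjE es u)
              ((if a == u then [b] else []) ++ (if b == u then [a] else [])) := by
        intro u
        simp only [pvAdjE, List.flatMap_append, PySem.Set.ofList_append]
        simp
      rw [List.foldl_append]
      have hNodup : (pvOrderE es).Nodup := PySem.Set.nodup_ofList _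
      have hNil : ∀ u, u ∉ pvOrderE es → pvAdjE es u = [] := fun u h => pvAdjE_nil h
      have h1 := pvAdd_items (d := (es.foldl pvStepE (PySem.Dict.empty, PySem.Set.empty)).1)
        a b ihD hNodup hNil
      have hNodup1 : ((pvOrderE es).add a).Nodup := PySem.Set.nodup_add _ _ hNodup
      have hNil1 : ∀ u, u ∉ (pvOrderE es).add a →
          (if u = a then (pvAdjE es u).add b else pvAdjE es u) = [] := by
        intro u hu
        rw [PySem.Set.mem_add] at hu
        rw [if_neg (fun h => hu (Or.inr h)), hNil u (fun h => hu (Or.inl h))]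
      have h2 := pvAdd_items (d := pvAdd (es.foldl pvStepE (PySem.Dict.empty, PySem.Set.empty)).1 a b)
        b a h1 hNodup1 hNil1
      constructor
      · show (pvAdd (pvAdd _ a b) b a).items = _
        rw [h2, hOrd]
        apply List.map_congr_left
        intro u _
        congr 1
        rw [hAdj u]
        by_cases hua : u = a <;> by_cases hub : u = b
        · subst hua; subst hub
          simp [PySem.Set.update_cons, PySem.Set.update_nil]
        · subst hua
          have hb : (b == u) = false := beq_eq_false_iff_ne.mpr (Ne.symm hub)
          simp [hb, hub, PySem.Set.update_cons, PySem.Set.update_nil]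
        · subst hub
          have ha : (a == u) = false := beq_eq_false_iff_ne.mpr (Ne.symm hua)
          simp [ha, hua, PySem.Set.update_cons, PySem.Set.update_nil]
        · have ha : (a == u) = false := beq_eq_false_iff_ne.mpr (Ne.symm hua)
          have hb : (b == u) = false := beq_eq_false_iff_ne.mpr (Ne.symm hub)
          simp [ha, hb, hua, hub, PySem.Set.update_nil]
      · show PySem.Set.add (PySem.Set.add _ a) b = _
        rw [ihS, hOrd]

-- ==== bridging the edge-level closed form to B's line-level closed form ====

theorem pv_fadd_pres {x : String} :
    ∀ (l : List String) (s : PySem.Set String), x ∈ s → x ∈ l.foldl PySem.Set.add s := by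
  intro l
  induction l with
  | nil => intro s h; exact h
  | cons c l ih => intro s h; exact ih _ ((PySem.Set.mem_add _ _ _).mpr (Or.inl h))

theorem pv_fadd_mem {x : String} :
    ∀ (l : List String) (s : PySem.Set String), x ∈ l → x ∈ l.foldl PySem.Set.add s := by
  intro l
  induction l with
  | nil => intro s h; exact absurd h (List.not_mem_nil)
  | cons c l ih =>
      intro s h
      rcases List.mem_cons.mp h with h | h
      · exact pv_fadd_pres l _ ((PySem.Set.mem_add _ _ _).mpr (Or.inr h))
      · exact ih _ h

-- the node stream of one line, edge form vs line form
theorem pv_osrc {src : String} :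
    ∀ (rest : List String) (s : PySem.Set String), src ∈ s →
      (rest.flatMap (fun c => [src, c])).foldl PySem.Set.add s = rest.foldl PySem.Set.add s := by
  intro rest
  induction rest with
  | nil => intro s _; rfl
  | cons c rest ih =>
      intro s h
      simp only [List.flatMap_cons, List.foldl_append, List.foldl_cons]
      rw [PySem.Set.add_of_mem h]
      exact ih _ ((PySem.Set.mem_add _ _ _).mpr (Or.inl h))

theorem pv_order_line (src : String) (conns : List String) (hne : conns ≠ [])
    (s : PySem.Set String) :
    (conns.flatMap (fun c => [src, c])).foldl PySem.Set.add s
      = (src :: conns).foldl PySem.Set.add s := by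
  cases conns with
  | nil => exact absurd rfl hne
  | cons c rest =>
      simp only [List.flatMap_cons, List.foldl_append, List.foldl_cons]
      exact pv_osrc rest _ ((PySem.Set.mem_add _ _ _).mpr
        (Or.inl ((PySem.Set.mem_add _ _ _).mpr (Or.inr rfl))))

-- the adjacency stream of one line at u, edge form vs line form
theorem pv_adj_only {src u : String} :
    ∀ (rest : List String) (s : PySem.Set String), src ∈ s →
      (rest.flatMap (fun c => if c == u then [src] else [])).foldl PySem.Set.add s = s := by
  intro rest
  induction rest with
  | nil => intro s _; rfl
  | cons c rest ih =>
      intro s h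
      simp only [List.flatMap_cons, List.foldl_append]
      by_cases hc : c == u
      · rw [if_pos hc]
        simp only [List.foldl_cons, List.foldl_nil]
        rw [PySem.Set.add_of_mem h]
        exact ih _ h
      · rw [if_neg hc]
        exact ih _ h

theorem pv_adj_back {src u : String} :
    ∀ (conns : List String) (s : PySem.Set String),
      (conns.flatMap (fun c => if c == u then [src] else [])).foldl PySem.Set.add s
        = (if u ∈ conns then [src] else []).foldl PySem.Set.add s := by
  intro conns
  induction conns with
  | nil => intro s; rfl
  | cons c rest ih =>
      intro s
      simp only [List.flatMap_cons, List.foldl_append]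
      by_cases hc : c = u
      · rw [if_pos (by simp [hc]), if_pos (by simp [hc])]
        simp only [List.foldl_cons, List.foldl_nil]
        exact pv_adj_only rest _ ((PySem.Set.mem_add _ _ _).mpr (Or.inr rfl))
      · rw [if_neg (by simp [hc])]
        simp only [List.foldl_nil]
        rw [ih s]
        by_cases hu : u ∈ rest
        · rw [if_pos hu, if_pos (List.mem_cons_of_mem _ hu)]
        · have hnc : u ∉ c :: rest := by
            simp only [List.mem_cons, not_or]
            exact ⟨fun h => hc h.symm, hu⟩
          rw [if_neg hu, if_neg hnc]

theorem pv_adj_fwd {u : String} :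
    ∀ (conns : List String) (s : PySem.Set String),
      (conns.flatMap (fun c => [c] ++ (if c == u then [u] else []))).foldl PySem.Set.add s
        = conns.foldl PySem.Set.add s := by
  intro conns
  induction conns with
  | nil => intro s; rfl
  | cons c rest ih =>
      intro s
      simp only [List.flatMap_cons, List.foldl_append, List.cons_append, List.nil_append,
        List.foldl_cons]
      by_cases hc : (c == u) = true
      · have hcu : c = u := by simpa using hc
        subst hcu
        rw [if_pos hc]
        simp only [List.foldl_cons, List.foldl_nil]
        rw [PySem.Set.add_of_mem ((PySem.Set.mem_add _ _ _).mpr (Or.inr rfl))]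
        exact ih _
      · rw [if_neg hc]
        exact ih _

theorem pv_adj_line (src u : String) (conns : List String) (s : PySem.Set String) :
    (conns.flatMap (fun c => (if src == u then [c] else []) ++ (if c == u then [src] else []))).foldl
        PySem.Set.add s
      = ((if src == u then conns else []) ++ (if u ∈ conns then [src] else [])).foldl
        PySem.Set.add s := by
  by_cases hs : (src == u) = true
  · have hsu : src = u := by simpa using hs
    subst hsu
    have hcc : (src == src) = true := by simp
    simp only [if_pos hcc]
    rw [pv_adj_fwd conns s, List.foldl_append]
    by_cases hu : src ∈ conns
    · rw [if_pos hu]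
      simp only [List.foldl_cons, List.foldl_nil]
      exact (PySem.Set.add_of_mem (pv_fadd_mem conns s hu)).symm
    · rw [if_neg hu]
      rfl
  · have hs' : (src == u) = false := by simpa using hs
    simp only [hs', Bool.false_eq_true, if_false, List.nil_append]
    exact pv_adj_back conns s

-- ==== assembling the two closed forms ====

def pvGB (p : String × List String) (u : String) : List String :=
  (if p.1 == u then p.2 else []) ++ (if u ∈ p.2 then [p.1] else [])

theorem pv_neighbors_eq (parsed : List (String × List String)) (u : String) :
    pvNeighbors parsed u = PySem.Set.ofList (parsed.flatMap (fun p => pvGB p u)) := by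
  unfold pvNeighbors
  congr 1
  have hstep :
      (fun (out : List String) (p : String × List String) =>
        let out := if p.1 == u then out ++ p.2 else out
        if u ∈ p.2 then out ++ [p.1] else out)
      = fun out p => out ++ pvGB p u := by
    funext out p
    simp only [pvGB]
    by_cases h1 : (p.1 == u) = true <;> by_cases h2 : u ∈ p.2 <;>
      simp [h1, h2, List.append_assoc]
  rw [hstep, PySem.List.foldl_append_eq_flatMap]
  simp

theorem pv_flatMap_map {α β γ : Type} (f : α → β) (g : β → List γ) :
    ∀ l : List α, (l.map f).flatMap g = l.flatMap (fun a => g (f a)) := by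
  intro l
  induction l with
  | nil => rfl
  | cons a l ih => simp only [List.map_cons, List.flatMap_cons, ih]

theorem pv_edges_flatMap {γ : Type} (src : String) (conns : List String)
    (g : String × String → List γ) :
    ((conns.map (fun dst => (src, dst))).flatMap g) = conns.flatMap (fun c => g (src, c)) :=
  pv_flatMap_map _ _ _

theorem pv_order_line' (l : String) (s : PySem.Set String) :
    ((pvEdges l).flatMap (fun e => [e.1, e.2])).foldl PySem.Set.add s
      = ((pvParseLine l).1 :: (pvParseLine l).2).foldl PySem.Set.add s := by
  simp only [pvEdges]
  rw [pv_edges_flatMap]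
  dsimp only
  exact pv_order_line _ _ (pv_conns_ne_nil l) s

theorem pv_adj_line' (l : String) (u : String) (s : PySem.Set String) :
    ((pvEdges l).flatMap
        (fun e => (if e.1 == u then [e.2] else []) ++ (if e.2 == u then [e.1] else []))).foldl
        PySem.Set.add s
      = (pvGB (pvParseLine l) u).foldl PySem.Set.add s := by
  simp only [pvEdges]
  rw [pv_edges_flatMap]
  dsimp only
  rw [pv_adj_line]
  rfl

theorem pv_order_all :
    ∀ (lines : List String) (s : PySem.Set String),
      ((lines.flatMap pvEdges).flatMap (fun e => [e.1, e.2])).foldl PySem.Set.add s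
        = ((lines.map pvParseLine).flatMap (fun p => p.1 :: p.2)).foldl PySem.Set.add s := by
  intro lines
  induction lines with
  | nil => intro s; rfl
  | cons l rest ih =>
      intro s
      simp only [List.flatMap_cons, List.map_cons, List.flatMap_append, List.foldl_append]
      rw [pv_order_line', ih]

theorem pv_adj_all (u : String) :
    ∀ (lines : List String) (s : PySem.Set String),
      ((lines.flatMap pvEdges).flatMap
          (fun e => (if e.1 == u then [e.2] else []) ++ (if e.2 == u then [e.1] else []))).foldl
          PySem.Set.add s
        = ((lines.map pvParseLine).flatMap (fun p => pvGB p u)).foldl PySem.Set.add s := by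
  intro lines
  induction lines with
  | nil => intro s; rfl
  | cons l rest ih =>
      intro s
      simp only [List.flatMap_cons, List.map_cons, List.flatMap_append, List.foldl_append]
      rw [pv_adj_line', ih]

theorem pv_orderE_eq (lines : List String) :
    pvOrderE (lines.flatMap pvEdges)
      = PySem.Set.ofList ((lines.map pvParseLine).flatMap (fun p => p.1 :: p.2)) := by
  simp only [pvOrderE, PySem.Set.ofList_eq_foldl]
  exact pv_order_all lines []

theorem pv_adjE_eq (lines : List String) (u : String) :
    pvAdjE (lines.flatMap pvEdges) u
      = PySem.Set.ofList ((lines.map pvParseLine).flatMap (fun p => pvGB p u)) := by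
  simp only [pvAdjE, PySem.Set.ofList_eq_foldl]
  exact pv_adj_all u lines []

theorem pv_items_foldl_insert (f : String → PySem.Set String) :
    ∀ (l : List String) (d : PySem.Dict String (PySem.Set String)), l.Nodup →
      (∀ u ∈ l, d.contains u = false) →
      (l.foldl (fun d u => d.insert u (f u)) d).items = d.items ++ l.map (fun u => (u, f u)) := by
  intro l
  induction l with
  | nil => intro d _ _; simp
  | cons u l ih =>
      intro d hnd hfresh
      obtain ⟨hu, hl⟩ := List.nodup_cons.mp hnd
      simp only [List.foldl_cons, List.map_cons]
      rw [ih _ hl (fun v hv => by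
        rw [PySem.Dict.contains_insert]
        have hvu : (v == u) = false :=
          beq_eq_false_iff_ne.mpr (fun h => hu (h ▸ hv))
        rw [hvu, hfresh v (List.mem_cons_of_mem _ hv)]
        rfl)]
      rw [PySem.Dict.items_insert_of_not_contains _ _ (hfresh u (by simp))]
      simp [List.append_assoc]

theorem parse_spec : Claim_equal_parse := by
  intro lines _ _
  show parse lines = parse_alt lines
  have hA := pv_edge_closed (lines.flatMap pvEdges)
  have hparsed : lines.foldl (fun acc line => acc ++ [pvParseLine line]) ([] : List (String × List String))
      = lines.map pvParseLine := by
    rw [PySem.List.foldl_append_singleton_eq_map]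
    rfl
  simp only [parse, parse_alt, hparsed]
  rw [pv_main lines _ PySem.Dict.nodup_keys_empty]
  rw [hA.1, hA.2]
  have hnod : (PySem.Set.ofList
      ((lines.map pvParseLine).flatMap (fun p => p.1 :: p.2))).Nodup :=
    PySem.Set.nodup_ofList _
  rw [pv_items_foldl_insert _ _ _ hnod (fun u _ => PySem.Dict.contains_empty u),
    PySem.Set.ofList_eq_self_of_nodup _ hnod, pv_orderE_eq lines]
  show (_, _) = (_, _)
  congr 1
  · show List.map _ _ = PySem.Dict.empty.items ++ List.map _ _
    rw [show PySem.Dict.empty.items = ([] : List (String × PySem.Set String)) from rfl,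
      List.nil_append]
    apply List.map_congr_left
    intro u _
    rw [pv_neighbors_eq, ← pv_adjE_eq]
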